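-- pv_equiv track=rewrite | github.com/FrancoARossi/SySdL-TPs | pruebas.py | a_re2
-- ===== SOURCE A (Python) =====
-- def a_re2 (word):
-- 	s = 0
-- 	for c in word:
-- 		if s == 0 and c == 'f':
-- 			s = 1
-- 		elif s == 1 and c == 'l':
-- 			s = 2
-- 		elif s == 2 and c == 'o':
-- 			s = 3
-- 		elif s == 3 and c == 'a':
-- 			s = 4
-- 		elif s == 4 and c == 't':
-- 			s = 5
-- 		else:
-- 			s = -1
-- 			break
-- 	return (s == 5)
-- ===== SOURCE B (Python) =====
-- def a_re2(word):
--     return list(word) == ['f', 'l', 'o', 'a', 't']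
-- ===== Notes on version B (the rewrite author's own statement) =====
-- stated objective: simpler
-- what changed: Replaces the explicit character-by-character state machine (state variable, branch chain, break) with a single whole-sequence comparison of the characters against ['f','l','o','a','t'].
import Mathlib
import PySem

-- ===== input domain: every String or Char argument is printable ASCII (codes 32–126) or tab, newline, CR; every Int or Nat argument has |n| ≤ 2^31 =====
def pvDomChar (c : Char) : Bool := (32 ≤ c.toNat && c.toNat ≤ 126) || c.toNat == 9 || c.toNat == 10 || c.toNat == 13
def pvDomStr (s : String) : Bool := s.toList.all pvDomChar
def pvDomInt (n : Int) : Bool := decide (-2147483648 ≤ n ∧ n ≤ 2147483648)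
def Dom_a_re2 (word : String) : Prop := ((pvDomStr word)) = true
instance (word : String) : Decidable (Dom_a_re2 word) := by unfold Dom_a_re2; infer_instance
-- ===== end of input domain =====

-- B replaces A's character-by-character state machine with one whole-list comparison
-- against ['f','l','o','a','t'] (objective: simpler).


-- ===== PORT A =====
-- the for-loop with its state s and early 'break' on the else branch
def aRe2Loop : List Char → Int → Int
  | [], s => s
  | c :: cs, s =>
    if s = 0 ∧ c = 'f' then aRe2Loop cs 1
    else if s = 1 ∧ c = 'l' then aRe2Loop cs 2
    else if s = 2 ∧ c = 'o' then aRe2Loop cs 3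
    else if s = 3 ∧ c = 'a' then aRe2Loop cs 4
    else if s = 4 ∧ c = 't' then aRe2Loop cs 5
    else (-1 : Int)  -- s = -1; break

def a_re2 (word : String) : Bool :=
  aRe2Loop word.toList 0 == 5

-- ===== PORT B =====
def a_re2_alt (word : String) : Bool :=
  word.toList == ['f', 'l', 'o', 'a', 't']

-- ===== PRECONDITION & SPEC =====
def Spec_a_re2 (word : String) (out : Bool) : Prop := out = a_re2_alt word
instance (word : String) (out : Bool) : Decidable (Spec_a_re2 word out) := by unfold Spec_a_re2; infer_instance

-- ===== CLAIM (what is proved, stated in full; the proofs are below) =====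
def Claim_equal_a_re2 : Prop := ∀ (word : String), Dom_a_re2 word → Spec_a_re2 word (a_re2 word)

-- ===== LEMMAS AND PROOFS =====

theorem aRe2Loop_state5 : ∀ (cs : List Char), (aRe2Loop cs 5 = 5) ↔ cs = [] := by
  intro cs; cases cs <;> simp [aRe2Loop]

theorem aRe2Loop_state4 : ∀ (cs : List Char), (aRe2Loop cs 4 = 5) ↔ cs = ['t'] := by
  intro cs
  cases cs with
  | nil => simp [aRe2Loop]
  | cons c cs =>
    by_cases h : c = 't' <;> simp [aRe2Loop, h, aRe2Loop_state5]

theorem aRe2Loop_state3 : ∀ (cs : List Char), (aRe2Loop cs 3 = 5) ↔ cs = ['a', 't'] := by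
  intro cs
  cases cs with
  | nil => simp [aRe2Loop]
  | cons c cs =>
    by_cases h : c = 'a' <;> simp [aRe2Loop, h, aRe2Loop_state4]

theorem aRe2Loop_state2 : ∀ (cs : List Char), (aRe2Loop cs 2 = 5) ↔ cs = ['o', 'a', 't'] := by
  intro cs
  cases cs with
  | nil => simp [aRe2Loop]
  | cons c cs =>
    by_cases h : c = 'o' <;> simp [aRe2Loop, h, aRe2Loop_state3]

theorem aRe2Loop_state1 : ∀ (cs : List Char), (aRe2Loop cs 1 = 5) ↔ cs = ['l', 'o', 'a', 't'] := by
  intro cs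
  cases cs with
  | nil => simp [aRe2Loop]
  | cons c cs =>
    by_cases h : c = 'l' <;> simp [aRe2Loop, h, aRe2Loop_state2]

theorem aRe2Loop_state0 : ∀ (cs : List Char), (aRe2Loop cs 0 = 5) ↔ cs = ['f', 'l', 'o', 'a', 't'] := by
  intro cs
  cases cs with
  | nil => simp [aRe2Loop]
  | cons c cs =>
    by_cases h : c = 'f' <;> simp [aRe2Loop, h, aRe2Loop_state1]

-- ===== VERDICT (by name: the statement is the Claim_ definition above) =====
theorem a_re2_spec : Claim_equal_a_re2 := by
  intro word _
  unfold Spec_a_re2 a_re2 a_re2_alt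
  simp [aRe2Loop_state0]
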